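-- pv_equiv track=rewrite | github.com/Mgobeaalcoba/python_fundamentals | Programación 1 - Verano 2021/Ejercicio 2 TP 3.py | crearmatrizd
-- ===== SOURCE A (Python) =====
-- def crearmatrizd(filas,columnas):
--     matriz=[]
--     for f in range(filas):
--         matriz.append([0]*columnas)
--     aux=8
--     for f in range(filas):
--         for c in range(columnas):
--             matriz[f][c]=aux
--         aux = int(aux/2)
--     return matriz
-- ===== SOURCE B (Python) =====
-- def crearmatrizd(filas, columnas):
--     # The row values are just the fixed table [8, 4, 2, 1] truncated to n rows
--     # and padded with zeros: no halving accumulator is computed at all.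
--     n = max(filas, 0)
--     values = [8, 4, 2, 1][:n] + [0] * (n - 4)
--     return [[v] * columnas for v in values]
-- ===== Notes on version B (the rewrite author's own statement) =====
-- stated objective: alternative
-- what changed: B computes no halving at all: it takes the fixed table [8,4,2,1] of possible row values, truncates it to the row count and pads with zeros, then expands each value into a row with [v]*columnas, instead of A's zero-matrix prepass followed by a mutating double loop threading a halving accumulator.
import Mathlib
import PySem

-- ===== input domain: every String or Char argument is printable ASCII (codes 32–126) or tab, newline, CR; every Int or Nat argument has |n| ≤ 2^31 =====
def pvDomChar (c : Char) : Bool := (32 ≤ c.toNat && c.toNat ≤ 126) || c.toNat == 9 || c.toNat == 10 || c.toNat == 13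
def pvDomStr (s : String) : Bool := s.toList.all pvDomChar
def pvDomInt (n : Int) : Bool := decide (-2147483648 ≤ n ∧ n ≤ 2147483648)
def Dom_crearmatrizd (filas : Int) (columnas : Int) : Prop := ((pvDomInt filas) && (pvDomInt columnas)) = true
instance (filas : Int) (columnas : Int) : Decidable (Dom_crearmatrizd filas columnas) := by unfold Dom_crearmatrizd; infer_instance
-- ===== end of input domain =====

-- B computes no halving: it slices the fixed value table [8,4,2,1] to the row count, pads with zeros, and expands each value into a row (objective: alternative).

-- ===== PORT A =====
-- int(aux/2): aux only ever takes the values 8,4,2,1,0, all nonnegative, where Python's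
-- float truncation int(aux/2) equals floor division — ported as floordiv, exact here.
def crearmatrizd (filas : Int) (columnas : Int) : List (List Int) :=
  let matriz : List (List Int) :=
    (PySem.List.pyRange 0 filas 1).foldl
      (fun m _ => m ++ [PySem.List.pyRepeat [(0 : Int)] columnas]) []
  let st :=
    (PySem.List.pyRange 0 filas 1).foldl
      (fun (st : List (List Int) × Int) f =>
        ((PySem.List.pyRange 0 columnas 1).foldl
            (fun m c =>
              PySem.List.pySetD m f (PySem.List.pySetD (PySem.List.pyGetD m f []) c st.2))
            st.1,
         PySem.Int.floordiv st.2 2))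
      (matriz, 8)
  st.1

-- ===== PORT B =====
def crearmatrizd_alt (filas : Int) (columnas : Int) : List (List Int) :=
  let n : Int := max filas 0
  let values : List Int :=
    PySem.List.slice [8, 4, 2, 1] none (some n) ++ PySem.List.pyRepeat [(0 : Int)] (n - 4)
  values.map (fun v => PySem.List.pyRepeat [v] columnas)

-- ===== PRECONDITION & SPEC =====
def Spec_crearmatrizd (filas : Int) (columnas : Int) (out : List (List Int)) : Prop := out = crearmatrizd_alt filas columnas
instance (filas : Int) (columnas : Int) (out : List (List Int)) : Decidable (Spec_crearmatrizd filas columnas out) := by unfold Spec_crearmatrizd; infer_instance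

-- ===== CLAIM (what is proved, stated in full; the proofs are below) =====
def Claim_equal_crearmatrizd : Prop := ∀ (filas : Int) (columnas : Int), Dom_crearmatrizd filas columnas → Spec_crearmatrizd filas columnas (crearmatrizd filas columnas)

-- ===== LEMMAS AND PROOFS =====

-- aux after k halvings
def auxIter (a : Int) : Nat → Int
  | 0 => a
  | k + 1 => auxIter (PySem.Int.floordiv a 2) k

theorem auxIter_succ_right (a : Int) (k : Nat) :
    auxIter a (k + 1) = PySem.Int.floordiv (auxIter a k) 2 := by
  induction k generalizing a with
  | zero => rfl
  | succ k ih => simpa [auxIter] using ih (PySem.Int.floordiv a 2)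

theorem auxIter_zero_base (k : Nat) : auxIter 0 k = 0 := by
  induction k with
  | zero => rfl
  | succ k ih =>
    have h : PySem.Int.floordiv 0 2 = 0 := by decide
    simpa [auxIter, h] using ih

-- B's padded table equals the sequence of accumulator values
theorem values_eq (n : Nat) :
    ([8, 4, 2, 1] : List Int).take n ++ List.replicate (n - 4) (0 : Int)
      = (List.range n).map (auxIter 8) := by
  apply List.ext_getElem
  · simp; omega
  · intro i h1 h2
    have hi : i < n := by simpa using h2
    rw [List.getElem_map, List.getElem_range]
    by_cases h4 : i < 4
    · rw [List.getElem_append_left (by simp; omega), List.getElem_take]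
      interval_cases i <;> norm_num [auxIter, PySem.Int.floordiv] <;> decide
    · rw [List.getElem_append_right (by simp; omega), List.getElem_replicate]
      obtain ⟨k, rfl⟩ : ∃ k, i = k + 4 := ⟨i - 4, by omega⟩
      simp [auxIter, auxIter_zero_base]

-- the first loop of A builds a replicate
theorem build_replicate (l : List Int) (acc : List (List Int)) (r : List Int) :
    l.foldl (fun m _ => m ++ [r]) acc = acc ++ List.replicate l.length r := by
  induction l generalizing acc with
  | nil => simp
  | cons x xs ih =>
    rw [List.foldl_cons, ih, List.append_assoc]
    rfl

-- filling a prefix of a row with a constant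
theorem row_fill (aux : Int) (k : Nat) : ∀ (row : List Int), k ≤ row.length →
    ((PySem.List.pyRange 0 (k : Int) 1).foldl
        (fun r c => PySem.List.pySetD r c aux) row)
      = List.replicate k aux ++ row.drop k := by
  induction k with
  | zero =>
    intro row h
    simp [PySem.List.pyRange_one_eq_nil]
  | succ k ih =>
    intro row h
    have hk : k < row.length := h
    have h1 : ((k + 1 : Nat) : Int) = (k : Int) + 1 := by push_cast; ring
    rw [h1, PySem.List.pyRange_one_succ_right (by positivity), List.foldl_append,
      ih row (Nat.le_of_succ_le h)]
    simp only [List.foldl_cons, List.foldl_nil, PySem.List.pySetD_natCast]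
    rw [List.set_append, if_neg (by simp)]
    simp only [List.length_replicate, Nat.sub_self]
    rw [List.drop_eq_getElem_cons hk, List.set_cons_zero, List.replicate_succ', List.append_assoc]
    rfl

theorem row_fill_full (aux : Int) (columnas : Int) (row : List Int)
    (h : row.length = columnas.toNat) :
    (PySem.List.pyRange 0 columnas 1).foldl (fun r c => PySem.List.pySetD r c aux) row
      = List.replicate columnas.toNat aux := by
  by_cases hc : columnas ≤ 0
  · rw [Int.toNat_of_nonpos hc] at h ⊢
    rw [PySem.List.pyRange_one_eq_nil hc, List.foldl_nil, List.eq_nil_of_length_eq_zero h]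
    rfl
  · have hcast : ((columnas.toNat : Nat) : Int) = columnas := Int.toNat_of_nonneg (by omega)
    rw [← hcast, row_fill aux columnas.toNat row (le_of_eq h.symm)]
    simp [List.drop_of_length_le (le_of_eq h)]
    omega

-- the inner loop only rewrites row f
theorem inner_loop (aux : Int) (f : Nat) (cs : List Int) :
    ∀ (m : List (List Int)), f < m.length →
    (cs.foldl
        (fun m c =>
          PySem.List.pySetD m (f : Int) (PySem.List.pySetD (PySem.List.pyGetD m (f : Int) []) c aux))
        m)
      = m.set f (cs.foldl (fun r c => PySem.List.pySetD r c aux) (PySem.List.pyGetD m (f : Int) [])) := by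
  induction cs with
  | nil =>
    intro m hf
    simp only [List.foldl_nil]
    rw [PySem.List.pyGetD_natCast, List.getD_eq_getElem _ _ hf, List.set_getElem_self hf]
  | cons c cs ih =>
    intro m hf
    rw [List.foldl_cons]
    set X : List Int := PySem.List.pySetD (PySem.List.pyGetD m (f : Int) []) c aux with hX
    have hset : PySem.List.pySetD m (f : Int) X = m.set f X := PySem.List.pySetD_natCast ..
    have hlen : f < (PySem.List.pySetD m (f : Int) X).length := by
      rw [hset]; simpa using hf
    rw [ih _ hlen]
    have hget : PySem.List.pyGetD (PySem.List.pySetD m (f : Int) X) (f : Int) [] = X := by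
      rw [hset, PySem.List.pyGetD_natCast,
        List.getD_eq_getElem _ _ (by simpa using hf), List.getElem_set_self]
    rw [hget, hset, List.set_set, List.foldl_cons]

-- the outer loop, fully characterised
theorem outer_loop (columnas : Int) (n : Nat) :
    ∀ (m : List (List Int)) (aux : Int),
    (∀ row ∈ m, row.length = columnas.toNat) → n ≤ m.length →
    ((PySem.List.pyRange 0 (n : Int) 1).foldl
        (fun (st : List (List Int) × Int) f =>
          ((PySem.List.pyRange 0 columnas 1).foldl
              (fun mm c =>
                PySem.List.pySetD mm f (PySem.List.pySetD (PySem.List.pyGetD mm f []) c st.2))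
              st.1,
           PySem.Int.floordiv st.2 2))
        (m, aux))
      = ((List.range n).map (fun k => List.replicate columnas.toNat (auxIter aux k)) ++ m.drop n,
         auxIter aux n) := by
  induction n with
  | zero =>
    intro m aux hrows hn
    simp [PySem.List.pyRange_one_eq_nil, auxIter]
  | succ n ih =>
    intro m aux hrows hn
    have hn' : n < m.length := hn
    have h1 : ((n + 1 : Nat) : Int) = (n : Int) + 1 := by push_cast; ring
    rw [h1, PySem.List.pyRange_one_succ_right (by positivity), List.foldl_append,
      ih m aux hrows (Nat.le_of_succ_le hn)]
    rw [List.foldl_cons, List.foldl_nil]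
    set P : List (List Int) := (List.range n).map (fun k => List.replicate columnas.toNat (auxIter aux k)) with hP
    have hPlen : P.length = n := by simp [hP]
    have hMlen : n < (P ++ m.drop n).length := by
      simp [hPlen]; omega
    rw [inner_loop _ n _ _ hMlen]
    have hrow : PySem.List.pyGetD (P ++ m.drop n) (n : Int) [] = m[n] := by
      rw [PySem.List.pyGetD_natCast, List.getD_eq_getElem _ _ hMlen,
        List.getElem_append_right (by omega)]
      simp [hPlen]
    rw [hrow, row_fill_full _ _ _ (hrows _ (List.getElem_mem hn')), List.set_append]
    rw [if_neg (by omega), hPlen]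
    simp only [Nat.sub_self]
    rw [List.drop_eq_getElem_cons hn', List.set_cons_zero, Prod.mk.injEq]
    constructor
    · rw [List.range_succ, List.map_append, List.append_assoc]
      rfl
    · exact (auxIter_succ_right aux n).symm

-- rows of the initial matrix
theorem pyRepeat_zero_length (columnas : Int) :
    (PySem.List.pyRepeat [(0 : Int)] columnas).length = columnas.toNat := by
  simp [PySem.List.pyRepeat_singleton]

-- B unfolded to a map over the accumulator values
theorem alt_eq_map (filas : Int) (columnas : Int) :
    crearmatrizd_alt filas columnas
      = (List.range filas.toNat).map (fun k => List.replicate columnas.toNat (auxIter 8 k)) := by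
  dsimp only [crearmatrizd_alt]
  have hn : (0 : Int) ≤ max filas 0 := le_max_right _ _
  rw [PySem.List.slice_to _ hn, PySem.List.pyRepeat_singleton]
  have h1 : (max filas 0).toNat = filas.toNat := by omega
  have h2 : (max filas 0 - 4).toNat = filas.toNat - 4 := by omega
  rw [h1, h2, values_eq, List.map_map]
  apply List.map_congr_left
  intro k _
  simp [Function.comp, PySem.List.pyRepeat_singleton]

-- ===== VERDICT (by name: the statement is the Claim_ definition above) =====
theorem crearmatrizd_spec : Claim_equal_crearmatrizd := by
  intro filas columnas _
  unfold Spec_crearmatrizd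
  rw [alt_eq_map]
  by_cases hf : filas ≤ 0
  · have h0 : filas.toNat = 0 := by omega
    simp [crearmatrizd, PySem.List.pyRange_one_eq_nil hf, h0]
  · dsimp only [crearmatrizd]
    have hcast : ((filas.toNat : Nat) : Int) = filas := Int.toNat_of_nonneg (by omega)
    have hbuild :
        (PySem.List.pyRange 0 filas 1).foldl
          (fun m _ => m ++ [PySem.List.pyRepeat [(0 : Int)] columnas]) []
          = List.replicate filas.toNat (PySem.List.pyRepeat [(0 : Int)] columnas) := by
      rw [build_replicate]
      simp [PySem.List.length_pyRange_one]
    rw [hbuild]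
    have houter := outer_loop columnas filas.toNat
      (List.replicate filas.toNat (PySem.List.pyRepeat [(0 : Int)] columnas)) 8
      (by intro row hr; rw [List.eq_of_mem_replicate hr]; exact pyRepeat_zero_length columnas)
      (by simp)
    rw [hcast] at houter
    rw [houter]
    simp
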